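-- pv_equiv track=rewrite | github.com/psyas/TopCoder_python | Interesting_party.py | bestInvitation
-- ===== SOURCE A (Python) =====
-- def bestInvitation(first, second):
--     interest = list()
--     interest_set = set()
--     for a,b in zip(first, second):
--         interest.append(a)
--         interest.append(b)
--         interest_set.add(a)
--         interest_set.add(b)
--     return max([interest.count(x) for x in interest_set])
-- ===== SOURCE B (Python) =====
-- def bestInvitation(first, second):
--     combined = sorted(first[:len(second)] + second[:len(first)])
--     best = 0
--     run = 0
--     prev = None
--     for x in combined:
--         if x == prev:
--             run += 1
--         else:
--             run = 1
--             prev = x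
--         if run > best:
--             best = run
--     return best
-- ===== Notes on version B (the rewrite author's own statement) =====
-- stated objective: faster
-- what changed: B replaces A's unique-set plus per-unique-element list.count rescans by sorting the combined (zip-truncated) list once and scanning it for the longest run of equal adjacent elements.
import Mathlib
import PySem

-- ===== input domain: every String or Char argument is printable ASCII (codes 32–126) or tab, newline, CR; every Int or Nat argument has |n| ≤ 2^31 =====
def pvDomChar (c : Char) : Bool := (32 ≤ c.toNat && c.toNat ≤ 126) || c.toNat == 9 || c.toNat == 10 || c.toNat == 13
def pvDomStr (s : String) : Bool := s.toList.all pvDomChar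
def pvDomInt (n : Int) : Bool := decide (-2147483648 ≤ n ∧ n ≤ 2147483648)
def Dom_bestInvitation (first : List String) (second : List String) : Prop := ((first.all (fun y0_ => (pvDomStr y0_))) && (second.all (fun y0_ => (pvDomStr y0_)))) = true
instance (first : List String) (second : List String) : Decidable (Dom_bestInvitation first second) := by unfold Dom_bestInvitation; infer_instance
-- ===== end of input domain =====

-- B sorts the combined list once and scans for the longest run of equal adjacent
-- elements, instead of A's unique-set plus per-unique-element count rescans (objective: faster).

-- ===== PORT A =====
-- loop over zip(first, second): interest.append(a); interest.append(b); set.add(a); set.add(b);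
-- then max over [interest.count(x) for x in interest_set] (the max of counts is order-independent,
-- so consuming the set's list here is exact). `.getD 0` is only reached outside Pre_ (empty zip,
-- where Python's max([]) raises ValueError).
def bestInvitation (first : List String) (second : List String) : Int :=
  let st := (first.zip second).foldl
    (fun (st : List String × PySem.Set String) ab =>
      ((st.1 ++ [ab.1]) ++ [ab.2], PySem.Set.add (PySem.Set.add st.2 ab.1) ab.2))
    ([], PySem.Set.empty)
  (PySem.List.max? (st.2.map (fun x => (st.1.count x : Int))) (fun y => y)).getD 0

-- ===== PORT B =====
-- one iteration of B's run-scan loop: if x == prev: run += 1 else run = 1; prev = x;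
-- if run > best: best = run.  State is (best, run, prev).
def pvRunStep (st : Int × Int × Option String) (x : String) : Int × Int × Option String :=
  let r := if st.2.2 == some x then st.2.1 + 1 else 1
  let p := if st.2.2 == some x then st.2.2 else some x
  (if st.1 < r then r else st.1, r, p)

-- combined = sorted(first[:len(second)] + second[:len(first)]); then the run-scan loop over it.
def bestInvitation_alt (first : List String) (second : List String) : Int :=
  let combined := PySem.List.sorted (first.take second.length ++ second.take first.length) (fun x => x) false
  (combined.foldl pvRunStep (0, 0, none)).1

-- ===== PRECONDITION & SPEC =====
-- Pre_ excludes exactly the inputs with empty zip(first, second) (first or second empty):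
-- there A's max([]) raises ValueError.
def Pre_bestInvitation (first : List String) (second : List String) : Prop :=
  first ≠ [] ∧ second ≠ []
instance (first : List String) (second : List String) : Decidable (Pre_bestInvitation first second) := by unfold Pre_bestInvitation; infer_instance
def pvWitness_bestInvitation : List String × List String := (["a"], ["b"])

def Spec_bestInvitation (first : List String) (second : List String) (out : Int) : Prop := out = bestInvitation_alt first second
instance (first : List String) (second : List String) (out : Int) : Decidable (Spec_bestInvitation first second out) := by unfold Spec_bestInvitation; infer_instance

-- ===== CLAIM (what is proved, stated in full; the proofs are below) =====
def Claim_equal_bestInvitation : Prop := ∀ (first : List String) (second : List String), Dom_bestInvitation first second → Pre_bestInvitation first second → Spec_bestInvitation first second (bestInvitation first second)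

-- ===== LEMMAS AND PROOFS =====

-- "r is the maximum multiplicity of an element of l": attained and an upper bound.
def pvUB (l : List String) (r : Int) : Prop :=
  (∃ x ∈ l, (l.count x : Int) = r) ∧ ∀ x ∈ l, (l.count x : Int) ≤ r

theorem pvUB_unique {l : List String} {r s : Int} (hr : pvUB l r) (hs : pvUB l s) : r = s := by
  obtain ⟨⟨x, hx, hxr⟩, hru⟩ := hr
  obtain ⟨⟨y, hy, hys⟩, hsu⟩ := hs
  have h1 := hsu x hx
  have h2 := hru y hy
  omega

theorem pvUB_perm {l₁ l₂ : List String} {r : Int} (h : l₁.Perm l₂) (hu : pvUB l₁ r) : pvUB l₂ r := by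
  obtain ⟨⟨x, hx, hxr⟩, hru⟩ := hu
  refine ⟨⟨x, h.mem_iff.mp hx, by rw [← h.count_eq]; exact hxr⟩, ?_⟩
  intro y hy
  rw [← h.count_eq]
  exact hru y (h.mem_iff.mpr hy)

-- the maximum multiplicity as a running max (B's invariant quantity)
def pvBm (l : List String) : Int := l.foldl (fun m y => max m ((l.count y : Int))) 0

theorem pv_foldl_max_le {l : List String} {f : String → Int} {a b : Int}
    (h0 : a ≤ b) (h : ∀ x ∈ l, f x ≤ b) : l.foldl (fun m y => max m (f y)) a ≤ b := by
  induction l generalizing a with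
  | nil => exact h0
  | cons x t ih =>
      simp only [List.foldl_cons]
      exact ih (max_le h0 (h x (by simp))) (fun y hy => h y (by simp [hy]))

theorem pvBm_nonneg (t : List String) : 0 ≤ pvBm t := by
  simp only [pvBm]
  exact (PySem.List.le_foldl_max_int t (fun y => (t.count y : Int)) 0).1

theorem pv_foldl_max_mem {l : List String} {f : String → Int} {a : Int} :
    l.foldl (fun m y => max m (f y)) a = a ∨ ∃ x ∈ l, l.foldl (fun m y => max m (f y)) a = f x := by
  induction l generalizing a with
  | nil => exact Or.inl rfl
  | cons x t ih =>
      rcases ih (a := max a (f x)) with h | ⟨y, hy, hys⟩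
      · simp only [List.foldl_cons] at *
        rcases max_choice a (f x) with hm | hm
        · exact Or.inl (by rw [h, hm])
        · exact Or.inr ⟨x, by simp, by rw [h, hm]⟩
      · exact Or.inr ⟨y, by simp [hy], hys⟩

theorem pvBm_step (t : List String) (x : String) :
    pvBm (t ++ [x]) = max (pvBm t) ((t.count x : Int) + 1) := by
  have hc_eq : (t ++ [x]).count x = t.count x + 1 := by simp [List.count_append]
  have hc_ne : ∀ y, y ≠ x → (t ++ [x]).count y = t.count y := by
    intro y hy
    have h0 : List.count y [x] = 0 := List.count_eq_zero.mpr (by simp [hy])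
    simp [List.count_append, h0]
  have hlow := PySem.List.le_foldl_max_int t (fun y => (t.count y : Int)) 0
  have hlow' := PySem.List.le_foldl_max_int (t ++ [x]) (fun y => ((t ++ [x]).count y : Int)) 0
  simp only [pvBm] at *
  apply le_antisymm
  · apply pv_foldl_max_le
    · exact le_trans hlow.1 (le_max_left _ _)
    · intro y hy
      by_cases hxy : y = x
      · subst hxy
        rw [hc_eq]
        exact le_trans (by push_cast; omega) (le_max_right _ _)
      · rcases List.mem_append.mp hy with hyt | hyx
        · rw [hc_ne y hxy]
          exact le_trans (hlow.2 y hyt) (le_max_left _ _)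
        · exact absurd (by simpa using hyx) hxy
  · rw [max_le_iff]
    constructor
    · apply pv_foldl_max_le hlow'.1
      intro y hy
      have h1 : (t.count y : Int) ≤ ((t ++ [x]).count y : Int) := by
        by_cases hxy : y = x
        · subst hxy; rw [hc_eq]; push_cast; omega
        · rw [hc_ne y hxy]
      exact le_trans h1 (hlow'.2 y (List.mem_append.mpr (Or.inl hy)))
    · have hx := hlow'.2 x (by simp)
      rw [hc_eq] at hx
      push_cast at hx
      omega

theorem pv_pairwise_le_getLast {t : List String} (h : t.Pairwise (· ≤ ·)) (hne : t ≠ [])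
    {x : String} (hx : x ∈ t) : x ≤ t.getLast hne := by
  induction t with
  | nil => exact absurd rfl hne
  | cons a s ih =>
      by_cases hs : s = []
      · subst hs
        simp at hx
        simp [hx, List.getLast]
      · rw [List.getLast_cons hs]
        rcases List.mem_cons.mp hx with hxa | hxs
        · subst hxa
          have hlast : s.getLast hs ∈ s := List.getLast_mem hs
          exact (List.pairwise_cons.mp h).1 _ hlast
        · exact ih (List.pairwise_cons.mp h).2 hs hxs

-- main loop invariant of B's run scan over a sorted list
theorem pv_scan_go : ∀ (rest t : List String) (p : String) (hne : t ≠ []),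
    t.getLast hne = p → (t ++ rest).Pairwise (· ≤ ·) →
    (rest.foldl pvRunStep (pvBm t, (t.count p : Int), some p)).1 = pvBm (t ++ rest) := by
  intro rest
  induction rest with
  | nil => intro t p hne hlast hpw; simp
  | cons x r ih =>
      intro t p hne hlast hpw
      have hassoc : t ++ x :: r = (t ++ [x]) ++ r := by simp
      have hpw' : ((t ++ [x]) ++ r).Pairwise (· ≤ ·) := by rwa [hassoc] at hpw
      have hne' : t ++ [x] ≠ [] := by simp
      have hlast' : (t ++ [x]).getLast hne' = x := by simp
      by_cases hpx : p = x
      · subst hpx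
        have hstep : pvRunStep (pvBm t, ((t.count p : Nat) : Int), some p) p
            = (pvBm (t ++ [p]), ((t ++ [p]).count p : Int), some p) := by
          have hc : (t ++ [p]).count p = t.count p + 1 := by simp [List.count_append]
          simp only [pvRunStep, beq_self_eq_true, if_pos, Prod.mk.injEq]
          rw [pvBm_step, hc, max_def]
          refine ⟨?_, ?_, trivial⟩
          · split_ifs <;> omega
          · push_cast; ring
        simp only [List.foldl_cons, hstep]
        rw [ih (t ++ [p]) p hne' hlast' hpw', hassoc]
      · have hxt : x ∉ t := by
          intro hxmem
          have hall : ∀ a ∈ t, a ≤ x := by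
            intro a ha
            have := (List.pairwise_append.mp hpw).2.2 a ha x (by simp)
            exact this
          have hpt : t.Pairwise (· ≤ ·) := (List.pairwise_append.mp hpw).1
          have h1 : x ≤ p := hlast ▸ pv_pairwise_le_getLast hpt hne hxmem
          have h2 : p ≤ x := hall p (hlast ▸ List.getLast_mem hne)
          exact hpx (le_antisymm h2 h1)
        have hstep : pvRunStep (pvBm t, ((t.count p : Nat) : Int), some p) x
            = (pvBm (t ++ [x]), ((t ++ [x]).count x : Int), some x) := by
          have hc0 : t.count x = 0 := List.count_eq_zero_of_not_mem hxt
          have hc : (t ++ [x]).count x = 1 := by simp [List.count_append, hc0]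
          have hne2 : (some p == some x) = false := by simp [hpx]
          simp only [pvRunStep, hne2, Bool.false_eq_true, if_false, Prod.mk.injEq]
          rw [pvBm_step, hc0, hc, max_def]
          have h0 : (0 : Int) ≤ pvBm t := pvBm_nonneg t
          and_intros <;> first
            | (split_ifs <;> omega)
            | trivial
        simp only [List.foldl_cons, hstep]
        rw [ih (t ++ [x]) x hne' hlast' hpw', hassoc]

theorem pv_scan_sorted (s : List String) (hs : s ≠ []) (hpw : s.Pairwise (· ≤ ·)) :
    (s.foldl pvRunStep (0, 0, none)).1 = pvBm s := by
  cases s with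
  | nil => exact absurd rfl hs
  | cons x r =>
      have hstep : pvRunStep (0, 0, none) x = (pvBm [x], (([x].count x : Nat) : Int), some x) := by
        simp [pvRunStep, pvBm]
      simp only [List.foldl_cons, hstep]
      exact pv_scan_go r [x] x (by simp) (by simp) (by simpa using hpw)

theorem pvBm_UB (l : List String) (h : l ≠ []) : pvUB l (pvBm l) := by
  have hlow := PySem.List.le_foldl_max_int l (fun y => (l.count y : Int)) 0
  constructor
  · rcases pv_foldl_max_mem (l := l) (f := fun y => (l.count y : Int)) (a := 0) with h0 | ⟨x, hx, hxe⟩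
    · exfalso
      obtain ⟨y, hy⟩ := List.exists_mem_of_ne_nil l h
      have h1 : 0 < l.count y := List.count_pos_iff.mpr hy
      have h2 := hlow.2 y hy
      have : pvBm l = 0 := h0
      simp only [pvBm] at this
      omega
    · exact ⟨x, hx, hxe.symm⟩
  · exact hlow.2

-- a loop touching both components of each pair is the fold over the interleaved list
theorem pv_foldl_pairstep {α β : Type} (f : β → α → β) (l : List (α × α)) (d : β) :
    l.foldl (fun s ab => f (f s ab.1) ab.2) d
      = (l.flatMap fun ab => [ab.1, ab.2]).foldl f d := by
  induction l generalizing d with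
  | nil => rfl
  | cons h t ih => simp [List.flatMap_cons, ih]

-- the interleaved zip list is a rearrangement of B's truncated concatenation
theorem pv_interleave_perm : ∀ (f s : List String),
    ((f.zip s).flatMap fun ab => [ab.1, ab.2]).Perm (f.take s.length ++ s.take f.length) := by
  intro f
  induction f with
  | nil => intro s; simp
  | cons a f' ih =>
      intro s
      cases s with
      | nil => simp
      | cons b s' =>
          simp only [List.zip_cons_cons, List.flatMap_cons, List.length_cons, List.take_succ_cons]
          exact ((((ih s').cons b).trans List.perm_middle.symm).cons a)

-- A's value is the maximum multiplicity in the interleaved list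
theorem pvA_UB (L : List String) (h : L ≠ []) :
    pvUB L ((PySem.List.max? ((PySem.Set.ofList L).map (fun x => (L.count x : Int))) (fun y => y)).getD 0) := by
  obtain ⟨y, hy⟩ := List.exists_mem_of_ne_nil L h
  have hyS : y ∈ PySem.Set.ofList L := (PySem.Set.mem_ofList _ _).mpr hy
  have hmapne : (PySem.Set.ofList L).map (fun x => (L.count x : Int)) ≠ [] := by
    intro hnil
    rw [List.map_eq_nil_iff] at hnil
    rw [hnil] at hyS
    simp at hyS
  obtain ⟨m, hm⟩ : ∃ m, PySem.List.max? ((PySem.Set.ofList L).map (fun x => (L.count x : Int))) (fun y => y) = some m := by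
    cases hmax : PySem.List.max? ((PySem.Set.ofList L).map (fun x => (L.count x : Int))) (fun y => y) with
    | none =>
        rw [PySem.List.max?_eq_none_iff] at hmax
        exact absurd hmax hmapne
    | some m => exact ⟨m, rfl⟩
  rw [hm]
  constructor
  · have hmem := PySem.List.max?_mem hm
    obtain ⟨x, hxS, hxm⟩ := List.mem_map.mp hmem
    exact ⟨x, (PySem.Set.mem_ofList _ _).mp hxS, hxm⟩
  · intro x hx
    have hxS : x ∈ PySem.Set.ofList L := (PySem.Set.mem_ofList _ _).mpr hx
    have := PySem.List.max?_isMax hm ((L.count x : Int)) (List.mem_map.mpr ⟨x, hxS, rfl⟩)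
    simpa using this

-- ===== VERDICT (by name: the statement is the Claim_ definition above) =====
theorem bestInvitation_spec : Claim_equal_bestInvitation := by
  intro first second _ hpre
  obtain ⟨hf, hs⟩ := hpre
  unfold Spec_bestInvitation bestInvitation bestInvitation_alt
  rw [PySem.List.foldl_prod_mk (f := fun s (ab : String × String) => (s ++ [ab.1]) ++ [ab.2])
        (g := fun s (ab : String × String) => PySem.Set.add (PySem.Set.add s ab.1) ab.2)]
  rw [pv_foldl_pairstep (fun s x => s ++ [x]), pv_foldl_pairstep (fun (s : PySem.Set String) x => PySem.Set.add s x)]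
  rw [PySem.List.foldl_append_singleton_eq_self]
  rw [show ((first.zip second).flatMap fun ab => [ab.1, ab.2]).foldl PySem.Set.add PySem.Set.empty
        = PySem.Set.ofList ((first.zip second).flatMap fun ab => [ab.1, ab.2]) from
       (PySem.Set.ofList_eq_foldl _).symm]
  simp only [List.nil_append]
  set L := (first.zip second).flatMap fun ab => [ab.1, ab.2] with hL
  have hLne : L ≠ [] := by
    obtain ⟨a, f'⟩ := List.exists_cons_of_ne_nil hf
    obtain ⟨af, haf⟩ := f'
    obtain ⟨b, s'⟩ := List.exists_cons_of_ne_nil hs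
    obtain ⟨bs, hbs⟩ := s'
    rw [hL, haf, hbs]
    simp
  set s := PySem.List.sorted (first.take second.length ++ second.take first.length) (fun x => x) false with hsdef
  have hperm : s.Perm L := by
    have h1 : s.Perm (first.take second.length ++ second.take first.length) :=
      PySem.List.sorted_perm _ _ _
    exact h1.trans (pv_interleave_perm first second).symm
  have hsne : s ≠ [] := by
    intro hnil
    rw [hnil] at hperm
    exact hLne (hperm.symm.eq_nil)
  have hpw : s.Pairwise (· ≤ ·) := by
    simpa using PySem.List.sorted_pairwise (first.take second.length ++ second.take first.length) (fun x => x)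
  have hA := pvA_UB L hLne
  have hB : pvUB L ((s.foldl pvRunStep (0, 0, none)).1) := by
    rw [pv_scan_sorted s hsne hpw]
    exact pvUB_perm hperm (pvBm_UB s hsne)
  exact pvUB_unique hA hB
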